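-- pv_equiv track=rewrite | github.com/VidyaCKabber/Python-Programmimg | max_apples_within_range.py | max_apples_within_range
-- ===== SOURCE A (Python) =====
-- def max_apples_within_range(K, N, apple_sizes):
--     apple_sizes.sort()  # Sort the apple sizes in ascending order
--     max_apples = 0
--
--     for i in range(N):
--         for j in range(i, N):
--             if apple_sizes[j] - apple_sizes[i] <= K:
--                 max_apples = max(max_apples, j - i + 1)
--
--     return max_apples
-- ===== SOURCE B (Python) =====
-- def max_apples_within_range(K, N, apple_sizes):
--     # Two-pointer sliding window over the sorted array (sorts in place, like A).
--     apple_sizes.sort()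
--     best = 0
--     l = 0
--     for r in range(N):
--         while l <= r and apple_sizes[r] - apple_sizes[l] > K:
--             l += 1
--         if r - l + 1 > best:
--             best = r - l + 1
--     return best
-- ===== Notes on version B (the rewrite author's own statement) =====
-- stated objective: faster
-- what changed: Replaces A's quadratic scan over all index pairs with a single two-pointer sliding window over the sorted array, so each index is visited O(1) amortized times after the sort.
import Mathlib
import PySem

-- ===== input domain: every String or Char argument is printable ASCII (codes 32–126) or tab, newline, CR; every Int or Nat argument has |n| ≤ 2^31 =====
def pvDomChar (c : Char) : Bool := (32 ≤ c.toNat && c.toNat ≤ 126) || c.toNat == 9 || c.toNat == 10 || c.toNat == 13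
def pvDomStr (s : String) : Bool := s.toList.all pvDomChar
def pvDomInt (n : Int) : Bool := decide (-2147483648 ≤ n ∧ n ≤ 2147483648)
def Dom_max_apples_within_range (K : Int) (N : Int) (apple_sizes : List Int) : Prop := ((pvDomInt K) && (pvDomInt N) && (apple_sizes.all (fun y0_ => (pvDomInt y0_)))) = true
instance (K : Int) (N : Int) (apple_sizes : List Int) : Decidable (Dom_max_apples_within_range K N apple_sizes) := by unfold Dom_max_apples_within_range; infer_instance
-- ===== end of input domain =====

-- B replaces A's O(N^2) scan over all index pairs by a two-pointer sliding window
-- over the sorted array (asymptotically faster); both sort the list in place in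
-- Python — the equivalence proved here is about the RETURN value.


-- ===== PORT A =====
def max_apples_within_range (K : Int) (N : Int) (apple_sizes : List Int) : Int :=
  let s := PySem.List.sorted apple_sizes id
  (PySem.List.pyRange 0 N).foldl (fun m i =>
    (PySem.List.pyRange i N).foldl (fun m j =>
      if PySem.List.pyGetD s j 0 - PySem.List.pyGetD s i 0 ≤ K then max m (j - i + 1) else m) m) 0

-- ===== PORT B =====
-- the 'while l <= r and s[r]-s[l] > K: l += 1' loop of B
def pvAdv (K : Int) (s : List Int) (r : Int) (l : Int) : Int :=
  if l ≤ r ∧ PySem.List.pyGetD s r 0 - PySem.List.pyGetD s l 0 > K then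
    pvAdv K s r (l + 1)
  else l
termination_by (r + 1 - l).toNat
decreasing_by omega

def max_apples_within_range_alt (K : Int) (N : Int) (apple_sizes : List Int) : Int :=
  let s := PySem.List.sorted apple_sizes id
  ((PySem.List.pyRange 0 N).foldl (fun (st : Int × Int) r =>
    let l := pvAdv K s r st.2
    (if r - l + 1 > st.1 then r - l + 1 else st.1, l)) (0, 0)).1

-- ===== PRECONDITION & SPEC =====
-- A (and B) raise IndexError when 1 ≤ N and N exceeds the list length; exactly that is excluded.
def Pre_max_apples_within_range (K : Int) (N : Int) (apple_sizes : List Int) : Prop :=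
  N ≤ (apple_sizes.length : Int)
instance (K : Int) (N : Int) (apple_sizes : List Int) : Decidable (Pre_max_apples_within_range K N apple_sizes) := by unfold Pre_max_apples_within_range; infer_instance

def pvWitness_max_apples_within_range : Int × Int × List Int := (3, 4, [1, 9, 2, 4])

def Spec_max_apples_within_range (K : Int) (N : Int) (apple_sizes : List Int) (out : Int) : Prop := out = max_apples_within_range_alt K N apple_sizes
instance (K : Int) (N : Int) (apple_sizes : List Int) (out : Int) : Decidable (Spec_max_apples_within_range K N apple_sizes out) := by unfold Spec_max_apples_within_range; infer_instance

-- ===== CLAIM (what is proved, stated in full; the proofs are below) =====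
def Claim_equal_max_apples_within_range : Prop := ∀ (K : Int) (N : Int) (apple_sizes : List Int), Dom_max_apples_within_range K N apple_sizes → Pre_max_apples_within_range K N apple_sizes → Spec_max_apples_within_range K N apple_sizes (max_apples_within_range K N apple_sizes)

-- ===== LEMMAS AND PROOFS =====

-- generic foldl facts -------------------------------------------------------
theorem pv_le_foldl_init {α : Type} (f : Int → α → Int) (hmono : ∀ a x, a ≤ f a x) :
    ∀ (L : List α) (init : Int), init ≤ L.foldl f init := by
  intro L
  induction L with
  | nil => intro init; simp
  | cons x xs ih => intro init; exact le_trans (hmono init x) (ih (f init x))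

theorem pv_le_foldl_of_mem {α : Type} (f : Int → α → Int) (hmono : ∀ a x, a ≤ f a x)
    {L : List α} {x : α} (hx : x ∈ L) {c : Int} (hc : ∀ a, c ≤ f a x) :
    ∀ init, c ≤ L.foldl f init := by
  induction L with
  | nil => cases hx
  | cons y ys ih =>
    intro init
    rcases List.mem_cons.mp hx with h | h
    · subst h
      exact le_trans (hc init) (pv_le_foldl_init f hmono ys (f init x))
    · exact ih h (f init y)

theorem pv_foldl_exists_step {α : Type} (f : Int → α → Int) :
    ∀ (L : List α) (init : Int),
      L.foldl f init = init ∨ ∃ x ∈ L, ∃ a, L.foldl f init = f a x ∧ f a x ≠ a := by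
  intro L
  induction L with
  | nil => intro init; left; rfl
  | cons x xs ih =>
    intro init
    rcases ih (f init x) with h | ⟨y, hy, a, ha, hne⟩
    · by_cases hx : f init x = init
      · left; simpa [List.foldl, hx] using h
      · right; exact ⟨x, List.mem_cons_self, init, by simpa [List.foldl] using h, hx⟩
    · right; exact ⟨y, List.mem_cons_of_mem _ hy, a, by simpa [List.foldl] using ha, hne⟩

theorem pv_foldl_cond_attained {α : Type} (p : α → Prop) [DecidablePred p] (v : α → Int) :
    ∀ (L : List α) (init : Int),
      L.foldl (fun a x => if p x then max a (v x) else a) init = init ∨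
      ∃ x ∈ L, p x ∧ L.foldl (fun a x => if p x then max a (v x) else a) init = v x := by
  intro L
  induction L with
  | nil => intro init; left; rfl
  | cons x xs ih =>
    intro init
    rcases ih (if p x then max init (v x) else init) with h | ⟨y, hy, hp, hv⟩
    · by_cases hpx : p x
      · rcases max_cases init (v x) with ⟨hm, _⟩ | ⟨hm, _⟩
        · left; simp only [List.foldl]; rw [h]; simp [hpx, hm]
        · right
          exact ⟨x, List.mem_cons_self, hpx, by simp only [List.foldl]; rw [h]; simp [hpx, hm]⟩
      · left; simp only [List.foldl]; rw [h]; simp [hpx]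
    · right; exact ⟨y, List.mem_cons_of_mem _ hy, hp, by simpa [List.foldl] using hv⟩

-- pvAdv facts ----------------------------------------------------------------
theorem pvAdv_ge (K : Int) (s : List Int) (r l : Int) : l ≤ pvAdv K s r l := by
  fun_induction pvAdv with
  | case1 l h ih => omega
  | case2 l h => omega

theorem pvAdv_stop (K : Int) (s : List Int) (r l : Int) :
    ¬ (pvAdv K s r l ≤ r ∧ PySem.List.pyGetD s r 0 - PySem.List.pyGetD s (pvAdv K s r l) 0 > K) := by
  fun_induction pvAdv with
  | case1 l h ih => exact ih
  | case2 l h => exact h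

theorem pvAdv_min (K : Int) (s : List Int) (r l m : Int)
    (hlm : l ≤ m) (hstop : r < m ∨ PySem.List.pyGetD s r 0 - PySem.List.pyGetD s m 0 ≤ K) :
    pvAdv K s r l ≤ m := by
  fun_induction pvAdv with
  | case1 l h ih =>
    apply ih
    rcases lt_or_eq_of_le hlm with h' | h'
    · omega
    · subst h'; rcases hstop with h' | h' <;> omega
  | case2 l h => exact hlm

-- the two-pointer state sequence --------------------------------------------
def pvLseq (K : Int) (s : List Int) : Nat → Int
  | 0 => 0
  | m + 1 => pvAdv K s (m : Int) (pvLseq K s m)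

def pvBestB (K : Int) (s : List Int) : Nat → Int
  | 0 => 0
  | m + 1 => max (pvBestB K s m) ((m : Int) - pvLseq K s (m + 1) + 1)

theorem pvLseq_nonneg (K : Int) (s : List Int) (m : Nat) : 0 ≤ pvLseq K s m := by
  induction m with
  | zero => simp [pvLseq]
  | succ m ih => exact le_trans ih (pvAdv_ge K s m (pvLseq K s m))

theorem pvBestB_nonneg (K : Int) (s : List Int) (m : Nat) : 0 ≤ pvBestB K s m := by
  induction m with
  | zero => simp [pvBestB]
  | succ m ih => simp only [pvBestB]; omega

theorem pvBestB_ge_contrib (K : Int) (s : List Int) (m n : Nat) (h : m < n) :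
    (m : Int) - pvLseq K s (m + 1) + 1 ≤ pvBestB K s n := by
  induction n with
  | zero => omega
  | succ n ih =>
    simp only [pvBestB]
    rcases Nat.lt_succ_iff_lt_or_eq.mp h with h' | h'
    · have := ih h'; omega
    · subst h'; omega

-- B's fold computes (pvBestB, pvLseq)
theorem pv_foldB_eq (K : Int) (s : List Int) (n : Nat) :
    (PySem.List.pyRange 0 (n : Int)).foldl (fun (st : Int × Int) r =>
      let l := pvAdv K s r st.2
      (if r - l + 1 > st.1 then r - l + 1 else st.1, l)) (0, 0)
      = (pvBestB K s n, pvLseq K s n) := by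
  induction n with
  | zero => simp [PySem.List.pyRange_zero_nat, pvBestB, pvLseq]
  | succ n ih =>
    have hsplit : PySem.List.pyRange 0 ((n : Int) + 1)
        = PySem.List.pyRange 0 (n : Int) ++ [(n : Int)] :=
      PySem.List.pyRange_one_succ_right (by positivity)
    have hcast : ((n + 1 : Nat) : Int) = (n : Int) + 1 := by push_cast; ring
    rw [hcast, hsplit, List.foldl_append, ih]
    simp only [List.foldl, pvBestB, pvLseq]
    by_cases hgt : (n : Int) - pvAdv K s n (pvLseq K s n) + 1 > pvBestB K s n
    · simp [hgt]; omega
    · simp [hgt]; omega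

-- the key invariant: the left pointer never passes a feasible left end --------
theorem pvLseq_le (K : Int) (s : List Int) (N : Int) (hN : N ≤ (s.length : Int))
    (hmono : ∀ i j : Int, 0 ≤ i → i ≤ j → j < N →
      PySem.List.pyGetD s i 0 ≤ PySem.List.pyGetD s j 0) :
    ∀ (r : Nat), (r : Int) ≤ N → ∀ i : Int, 0 ≤ i →
      ((r : Int) ≤ i ∨ ((r : Int) < N ∧ PySem.List.pyGetD s r 0 - PySem.List.pyGetD s i 0 ≤ K)) →
      pvLseq K s r ≤ i := by
  intro r
  induction r with
  | zero => intro _ i hi _; simpa [pvLseq] using hi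
  | succ r ih =>
    intro hrN i hi hstop
    have hr1 : ((r + 1 : Nat) : Int) = (r : Int) + 1 := by push_cast; ring
    rcases hstop with hge | ⟨hlt, hK⟩
    · -- i ≥ r+1
      have hLr : pvLseq K s r ≤ i := ih (by omega) i hi (Or.inl (by omega))
      exact pvAdv_min K s r (pvLseq K s r) i hLr (Or.inl (by omega))
    · by_cases hcase : (r : Int) + 1 ≤ i
      · have hLr : pvLseq K s r ≤ i := ih (by omega) i hi (Or.inl (by omega))
        exact pvAdv_min K s r (pvLseq K s r) i hLr (Or.inl (by omega))
      · -- i ≤ r, so a r ≤ a (r+1) gives a r - a i ≤ K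
        have hir : i ≤ (r : Int) := by omega
        have hmr : PySem.List.pyGetD s r 0 ≤ PySem.List.pyGetD s ((r : Int) + 1) 0 := by
          have := hmono (r : Int) ((r : Int) + 1) (by positivity) (by omega) (by omega)
          exact this
        have hK' : PySem.List.pyGetD s r 0 - PySem.List.pyGetD s i 0 ≤ K := by
          have := hK; rw [hr1] at this; omega
        have hLr : pvLseq K s r ≤ i :=
          ih (by omega) i hi (Or.inr ⟨by omega, hK'⟩)
        exact pvAdv_min K s r (pvLseq K s r) i hLr (Or.inr hK')

-- A's fold: lower bound at any feasible pair ---------------------------------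
theorem pvA_ge_pair (K N : Int) (s : List Int) (i j : Int)
    (hi0 : 0 ≤ i) (hij : i ≤ j) (hjN : j < N)
    (hK : PySem.List.pyGetD s j 0 - PySem.List.pyGetD s i 0 ≤ K) :
    j - i + 1 ≤ (PySem.List.pyRange 0 N).foldl (fun m i =>
      (PySem.List.pyRange i N).foldl (fun m j =>
        if PySem.List.pyGetD s j 0 - PySem.List.pyGetD s i 0 ≤ K then max m (j - i + 1) else m) m) 0 := by
  have hinner_mono : ∀ (i' : Int) (a : Int) (x : Int), a ≤
      (fun m j => if PySem.List.pyGetD s j 0 - PySem.List.pyGetD s i' 0 ≤ K then max m (j - i' + 1) else m) a x := by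
    intro i' a x; dsimp only; split <;> simp
  have houter_mono : ∀ (a : Int) (x : Int), a ≤
      (PySem.List.pyRange x N).foldl (fun m j =>
        if PySem.List.pyGetD s j 0 - PySem.List.pyGetD s x 0 ≤ K then max m (j - x + 1) else m) a := by
    intro a x
    exact pv_le_foldl_init _ (hinner_mono x) _ a
  apply pv_le_foldl_of_mem _ houter_mono
    (x := i) (PySem.List.mem_pyRange_one.mpr ⟨hi0, by omega⟩)
  intro a
  apply pv_le_foldl_of_mem _ (hinner_mono i)
    (x := j) (PySem.List.mem_pyRange_one.mpr ⟨hij, hjN⟩)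
  intro a'
  simp [hK]

-- A's fold: its value is 0 or attained at a feasible pair ---------------------
theorem pvA_attained (K N : Int) (s : List Int) :
    (PySem.List.pyRange 0 N).foldl (fun m i =>
      (PySem.List.pyRange i N).foldl (fun m j =>
        if PySem.List.pyGetD s j 0 - PySem.List.pyGetD s i 0 ≤ K then max m (j - i + 1) else m) m) 0 = 0 ∨
    ∃ i j : Int, 0 ≤ i ∧ i ≤ j ∧ j < N ∧
      PySem.List.pyGetD s j 0 - PySem.List.pyGetD s i 0 ≤ K ∧
      (PySem.List.pyRange 0 N).foldl (fun m i =>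
        (PySem.List.pyRange i N).foldl (fun m j =>
          if PySem.List.pyGetD s j 0 - PySem.List.pyGetD s i 0 ≤ K then max m (j - i + 1) else m) m) 0 = j - i + 1 := by
  rcases pv_foldl_exists_step (fun m i =>
      (PySem.List.pyRange i N).foldl (fun m j =>
        if PySem.List.pyGetD s j 0 - PySem.List.pyGetD s i 0 ≤ K then max m (j - i + 1) else m) m)
      (PySem.List.pyRange 0 N) 0 with h | ⟨i, hiL, a, ha, hne⟩
  · exact Or.inl h
  · rcases pv_foldl_cond_attained
        (fun j => PySem.List.pyGetD s j 0 - PySem.List.pyGetD s i 0 ≤ K)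
        (fun j => j - i + 1) (PySem.List.pyRange i N) a with h | ⟨j, hjL, hp, hv⟩
    · exact absurd h hne
    · have hi := PySem.List.mem_pyRange_one.mp hiL
      have hj := PySem.List.mem_pyRange_one.mp hjL
      exact Or.inr ⟨i, j, hi.1, hj.1, hj.2, hp, by rw [ha]; exact hv⟩

-- A's fold is nonnegative
theorem pvA_nonneg (K N : Int) (s : List Int) :
    0 ≤ (PySem.List.pyRange 0 N).foldl (fun m i =>
      (PySem.List.pyRange i N).foldl (fun m j =>
        if PySem.List.pyGetD s j 0 - PySem.List.pyGetD s i 0 ≤ K then max m (j - i + 1) else m) m) 0 := by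
  apply pv_le_foldl_init
  intro a x
  apply pv_le_foldl_init
  intro a' x'
  split <;> simp

-- B ≤ A : every window the two-pointer scan records is feasible
theorem pvB_le_A (K N : Int) (s : List Int)
    (hA0 : 0 ≤ (PySem.List.pyRange 0 N).foldl (fun m i =>
      (PySem.List.pyRange i N).foldl (fun m j =>
        if PySem.List.pyGetD s j 0 - PySem.List.pyGetD s i 0 ≤ K then max m (j - i + 1) else m) m) 0) :
    ∀ m : Nat, (m : Int) ≤ N → pvBestB K s m ≤ (PySem.List.pyRange 0 N).foldl (fun m i =>
      (PySem.List.pyRange i N).foldl (fun m j =>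
        if PySem.List.pyGetD s j 0 - PySem.List.pyGetD s i 0 ≤ K then max m (j - i + 1) else m) m) 0 := by
  intro m
  induction m with
  | zero => intro _; simpa [pvBestB] using hA0
  | succ m ih =>
    intro hmN
    have hprev := ih (by push_cast at hmN ⊢; omega)
    simp only [pvBestB]
    by_cases hc : (m : Int) - pvLseq K s (m + 1) + 1 ≤ 0
    · omega
    · have hl : pvLseq K s (m + 1) ≤ (m : Int) := by omega
      have hstop := pvAdv_stop K s (m : Int) (pvLseq K s m)
      have hK' : PySem.List.pyGetD s m 0 - PySem.List.pyGetD s (pvLseq K s (m + 1)) 0 ≤ K := by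
        simp only [pvLseq] at hl ⊢
        omega
      have hge := pvA_ge_pair K N s (pvLseq K s (m + 1)) (m : Int)
        (pvLseq_nonneg K s (m + 1)) hl (by push_cast at hmN; omega) hK'
      omega

-- ===== VERDICT (by name: the statement is the Claim_ definition above) =====
theorem max_apples_within_range_spec : Claim_equal_max_apples_within_range := by
  intro K N xs _ hpre
  unfold Spec_max_apples_within_range max_apples_within_range max_apples_within_range_alt
  dsimp only
  set s := PySem.List.sorted xs id with hs
  have hlen : (s.length : Int) = (xs.length : Int) := by
    rw [hs, PySem.List.length_sorted]
  have hNlen : N ≤ (s.length : Int) := by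
    unfold Pre_max_apples_within_range at hpre; omega
  have hmono : ∀ i j : Int, 0 ≤ i → i ≤ j → j < N →
      PySem.List.pyGetD s i 0 ≤ PySem.List.pyGetD s j 0 := by
    intro i j hi hij hjN
    rcases eq_or_lt_of_le hij with rfl | hlt
    · exact le_rfl
    · have hjlen : j < (s.length : Int) := by omega
      have hilen : i < (s.length : Int) := by omega
      rw [PySem.List.pyGetD_eq_getElem s 0 hi hilen,
          PySem.List.pyGetD_eq_getElem s 0 (by omega) hjlen]
      have hp := PySem.List.sorted_pairwise xs id
      rw [← hs] at hp
      have := (List.pairwise_iff_getElem.mp hp) i.toNat j.toNat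
        (by omega) (by omega) (by omega)
      simpa using this
  by_cases hN0 : N ≤ 0
  · rw [PySem.List.pyRange_one_eq_nil hN0]; rfl
  · have hNn : N = ((N.toNat : Nat) : Int) := by omega
    set n := N.toNat with hn
    conv_lhs => rw [hNn]
    conv_rhs => rw [hNn]
    rw [pv_foldB_eq]
    dsimp only
    rw [← hNn]
    have hA0 := pvA_nonneg K N s
    have hBleA := pvB_le_A K N s hA0 n (by omega)
    have hAleB : (PySem.List.pyRange 0 N).foldl (fun m i =>
        (PySem.List.pyRange i N).foldl (fun m j =>
          if PySem.List.pyGetD s j 0 - PySem.List.pyGetD s i 0 ≤ K then max m (j - i + 1) else m) m) 0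
        ≤ pvBestB K s n := by
      rcases pvA_attained K N s with h | ⟨i, j, hi0, hij, hjN, hK', hval⟩
      · rw [h]; exact pvBestB_nonneg K s n
      · have hjm : j = ((j.toNat : Nat) : Int) := by omega
        set mj := j.toNat with hmj
        have hmjn : mj < n := by omega
        have hLj : pvLseq K s mj ≤ i := by
          apply pvLseq_le K s N hNlen hmono mj (by omega) i hi0
          right
          constructor
          · omega
          · rw [← hjm]; omega
        have hL1 : pvLseq K s (mj + 1) ≤ i := by
          simp only [pvLseq]
          apply pvAdv_min K s (mj : Int) (pvLseq K s mj) i hLj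
          right
          rw [← hjm]; omega
        have hcontrib := pvBestB_ge_contrib K s mj n hmjn
        omega
    omega
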